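-- pv_equiv track=rewrite | github.com/Kenko2002/Projetos-Python | exercicios/q12.py | detectar_sublista
-- ===== SOURCE A (Python) =====
-- def detectar_sublista(sublista,lista):
--     cont=0
--     for i in range (len(sublista)):
--         for j in range(len(lista)):
--             if sublista[i]==lista[j]:
--                 cont+=1
--     if cont==len(sublista):
--         return True
--     else:
--         return False
-- ===== SOURCE B (Python) =====
-- def detectar_sublista(sublista, lista):
--     cs = {}
--     for x in sublista:
--         cs[x] = cs.get(x, 0) + 1
--     cl = {}
--     for x in lista:
--         cl[x] = cl.get(x, 0) + 1
--     total = 0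
--     for v, c in cs.items():
--         total += c * cl.get(v, 0)
--     return total == len(sublista)
-- ===== Notes on version B (the rewrite author's own statement) =====
-- stated objective: faster
-- what changed: Replaces the nested index-by-index scan with two frequency dictionaries built in one pass each, computing the total match count as a dot product over the distinct values of sublista.
import Mathlib
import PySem

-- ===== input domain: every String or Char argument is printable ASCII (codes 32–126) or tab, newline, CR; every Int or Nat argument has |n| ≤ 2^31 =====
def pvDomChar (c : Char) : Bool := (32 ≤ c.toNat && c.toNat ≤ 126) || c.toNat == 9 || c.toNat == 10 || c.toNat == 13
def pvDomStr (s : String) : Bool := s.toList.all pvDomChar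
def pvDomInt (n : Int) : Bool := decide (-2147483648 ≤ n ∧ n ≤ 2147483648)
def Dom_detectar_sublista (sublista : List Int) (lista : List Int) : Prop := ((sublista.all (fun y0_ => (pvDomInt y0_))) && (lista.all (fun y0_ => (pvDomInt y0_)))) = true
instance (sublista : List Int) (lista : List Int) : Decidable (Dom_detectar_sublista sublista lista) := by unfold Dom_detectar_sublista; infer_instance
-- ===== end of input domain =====

-- B replaces A's nested index-by-index scan with two one-pass frequency dictionaries
-- and a dot product over sublista's distinct values (asymptotically faster).


-- ===== PORT A =====
-- for i in range(len(sublista)): for j in range(len(lista)): if sublista[i]==lista[j]: cont+=1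
-- (indices produced by pyRange are always in range, so pyGetD's default 0 is never read)
def detectar_sublista (sublista : List Int) (lista : List Int) : Bool :=
  let cont : Int :=
    (PySem.List.pyRange 0 (PySem.List.len sublista)).foldl (fun cont i =>
      (PySem.List.pyRange 0 (PySem.List.len lista)).foldl (fun cont j =>
        if PySem.List.pyGetD sublista i 0 == PySem.List.pyGetD lista j 0 then cont + 1
        else cont) cont) 0
  if cont = PySem.List.len sublista then true else false

-- ===== PORT B =====
def detectar_sublista_alt (sublista : List Int) (lista : List Int) : Bool :=
  let cs := sublista.foldl (fun d x => d.insert x (d.getD x 0 + 1)) PySem.Dict.empty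
  let cl := lista.foldl (fun d x => d.insert x (d.getD x 0 + 1)) PySem.Dict.empty
  let total : Int := cs.items.foldl (fun acc kv => acc + kv.2 * cl.getD kv.1 0) 0
  decide (total = PySem.List.len sublista)

-- ===== PRECONDITION & SPEC =====
def Spec_detectar_sublista (sublista : List Int) (lista : List Int) (out : Bool) : Prop := out = detectar_sublista_alt sublista lista
instance (sublista : List Int) (lista : List Int) (out : Bool) : Decidable (Spec_detectar_sublista sublista lista out) := by unfold Spec_detectar_sublista; infer_instance

-- ===== CLAIM (what is proved, stated in full; the proofs are below) =====
def Claim_equal_detectar_sublista : Prop := ∀ (sublista : List Int) (lista : List Int), Dom_detectar_sublista sublista lista → Spec_detectar_sublista sublista lista (detectar_sublista sublista lista)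

-- ===== LEMMAS AND PROOFS =====

-- summing a 'hit once' function over a duplicate-free list that contains a picks out f a
theorem sum_map_ite_single (L : List Int) (a : Int) (f : Int → Int)
    (hnd : L.Nodup) (ha : a ∈ L) :
    (L.map (fun k => if a = k then f k else 0)).sum = f a := by
  induction L with
  | nil => cases ha
  | cons b L ih =>
    rcases List.nodup_cons.mp hnd with ⟨hb, hnd'⟩
    by_cases hab : a = b
    · subst hab
      have hz : (L.map (fun k => if a = k then f k else 0)).sum = 0 := by
        rw [List.sum_eq_zero]
        intro x hx
        rcases List.mem_map.mp hx with ⟨k, hk, rfl⟩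
        have : a ≠ k := fun h => hb (h ▸ hk)
        simp [this]
      simp [hz]
    · have ha' : a ∈ L := by
        rcases List.mem_cons.mp ha with h | h
        · exact absurd h hab
        · exact h
      simp [hab, ih hnd' ha']

-- dot product over the distinct values equals the plain sum over the multiset
theorem sum_count_mul (L sub : List Int) (f : Int → Int)
    (hnd : L.Nodup) (hsub : ∀ x ∈ sub, x ∈ L) :
    (L.map (fun k => (sub.count k : Int) * f k)).sum = (sub.map f).sum := by
  induction sub with
  | nil => simp
  | cons a sub ih =>
    have hstep : ∀ k : Int, ((a :: sub).count k : Int) * f k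
        = (sub.count k : Int) * f k + (if a = k then f k else 0) := by
      intro k
      rw [List.count_cons]
      by_cases h : a = k
      · simp [h, add_mul]
      · simp [h]
    have hmap : L.map (fun k => ((a :: sub).count k : Int) * f k)
        = L.map (fun k => (sub.count k : Int) * f k + (if a = k then f k else 0)) := by
      exact List.map_congr_left (fun k _ => hstep k)
    rw [hmap, PySem.List.sum_map_add_int,
      ih (fun x hx => hsub x (List.mem_cons_of_mem a hx)),
      sum_map_ite_single L a f hnd (hsub a (List.mem_cons_self ..))]
    simp [add_comm]

-- A's nested loop count, as a plain sum
theorem portA_cont (sublista lista : List Int) :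
    (PySem.List.pyRange 0 (PySem.List.len sublista)).foldl (fun cont i =>
      (PySem.List.pyRange 0 (PySem.List.len lista)).foldl (fun cont j =>
        if PySem.List.pyGetD sublista i 0 == PySem.List.pyGetD lista j 0 then cont + 1
        else cont) cont) 0
    = (sublista.map (fun x => (lista.count x : Int))).sum := by
  have hinner : ∀ (c : Int) (v : Int),
      (PySem.List.pyRange 0 (PySem.List.len lista)).foldl (fun cont j =>
        if v == PySem.List.pyGetD lista j 0 then cont + 1 else cont) c
      = c + (lista.count v : Int) := by
    intro c v
    rw [PySem.List.foldl_pyRange_pyGetD lista 0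
      (fun cont x => if v == x then cont + 1 else cont) c (le_refl 0)]
    simp only [Int.toNat_zero, List.drop_zero]
    have : (fun (cont : Int) (x : Int) => if v == x then cont + 1 else cont)
        = fun cont x => if x == v then cont + 1 else cont := by
      funext cont x
      by_cases hvx : v = x
      · simp [hvx]
      · have h1 : (v == x) = false := by simp [hvx]
        have h2 : (x == v) = false := by
          simp only [beq_eq_false_iff_ne]; exact fun hh => hvx hh.symm
        simp [h1, h2]
    rw [this, PySem.List.foldl_beq_add_one]
  rw [PySem.List.foldl_pyRange_pyGetD sublista 0
    (fun cont v =>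
      (PySem.List.pyRange 0 (PySem.List.len lista)).foldl (fun cont j =>
        if v == PySem.List.pyGetD lista j 0 then cont + 1 else cont) cont) 0 (le_refl 0)]
  simp only [Int.toNat_zero, List.drop_zero]
  have : (fun (cont : Int) (v : Int) =>
      (PySem.List.pyRange 0 (PySem.List.len lista)).foldl (fun cont j =>
        if v == PySem.List.pyGetD lista j 0 then cont + 1 else cont) cont)
      = fun cont v => cont + (lista.count v : Int) := by
    funext cont v; exact hinner cont v
  rw [this, PySem.List.foldl_add]
  simp

-- B's dot product, as the same sum
theorem portB_total (sublista lista : List Int) :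
    ((sublista.foldl (fun d x => d.insert x (d.getD x 0 + 1)) PySem.Dict.empty).items.foldl
      (fun acc kv => acc + kv.2 *
        (lista.foldl (fun d x => d.insert x (d.getD x 0 + 1)) PySem.Dict.empty).getD kv.1 0) 0)
    = (sublista.map (fun x => (lista.count x : Int))).sum := by
  rw [PySem.Dict.foldl_insert_getD_add_one_eq_counter,
    PySem.Dict.foldl_insert_getD_add_one_eq_counter,
    PySem.Dict.items_counter, PySem.List.foldl_add]
  simp only [List.map_map, Function.comp_def, PySem.Dict.getD_counter, zero_add]
  exact sum_count_mul (PySem.Set.ofList sublista) sublista (fun k => (lista.count k : Int))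
    (PySem.Set.nodup_ofList sublista) (fun x hx => (PySem.Set.mem_ofList sublista x).mpr hx)

-- ===== VERDICT (by name: the statement is the Claim_ definition above) =====
theorem detectar_sublista_spec : Claim_equal_detectar_sublista := by
  intro sublista lista _
  unfold Spec_detectar_sublista detectar_sublista detectar_sublista_alt
  simp only [portA_cont, portB_total]
  by_cases h : (sublista.map (fun x => (lista.count x : Int))).sum = PySem.List.len sublista
  · simp [h]
  · simp only [if_neg h, decide_eq_false h]
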